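-- pv_equiv track=rewrite | github.com/SimonFV/hamming_code | hamming.py | add_places
-- ===== SOURCE A (Python) =====
-- def is_power_of_two(n):
--     return (n != 0) and (n & (n - 1) == 0)
--
-- def add_places(data):
--     extended_data = []
--     i = 1
--     digit = 0
--     while digit < len(data):
--         if is_power_of_two(i):
--             extended_data.append(-1)
--         else:
--             extended_data.append(data[digit])
--             digit += 1
--         i += 1
--     return extended_data
-- ===== SOURCE B (Python) =====
-- def add_places(data):
--     # Block-slicing: parity placeholders sit exactly at positions 2**k (1-based).
--     # Between placeholder 2**k and the next one lie 2**k - 1 data slots, so copy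
--     # whole slices of doubling size instead of testing every position.
--     result = []
--     idx = 0
--     k = 0
--     n = len(data)
--     while idx < n:
--         result.append(-1)
--         chunk = (1 << k) - 1
--         result.extend(data[idx:idx + chunk])
--         idx += chunk
--         k += 1
--     return result
-- ===== Notes on version B (the rewrite author's own statement) =====
-- stated objective: faster
-- what changed: B never tests positions for being powers of two: it uses the closed form that placeholders sit exactly at positions 2^k with 2^k-1 data slots between consecutive ones, so it appends a -1 and block-copies a doubling-size slice of data per iteration (O(log n) loop iterations of slice copies) instead of A's per-position while loop with a bitwise power-of-two test at every output slot.
import Mathlib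
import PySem

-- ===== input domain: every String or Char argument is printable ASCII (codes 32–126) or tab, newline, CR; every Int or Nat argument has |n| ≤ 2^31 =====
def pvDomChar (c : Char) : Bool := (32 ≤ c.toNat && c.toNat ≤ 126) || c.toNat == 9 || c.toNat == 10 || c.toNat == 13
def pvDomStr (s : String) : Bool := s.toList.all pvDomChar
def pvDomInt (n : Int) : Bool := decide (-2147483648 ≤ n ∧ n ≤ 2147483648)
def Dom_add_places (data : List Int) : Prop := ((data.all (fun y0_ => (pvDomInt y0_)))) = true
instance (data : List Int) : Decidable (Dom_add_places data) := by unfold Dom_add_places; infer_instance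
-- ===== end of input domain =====

-- B replaces A's per-position power-of-two test with the closed form that placeholders sit
-- exactly at positions 2^k with 2^k-1 data slots between them, block-copying slices (faster).

-- ===== PORT A =====
def is_power_of_two (n : Int) : Bool := (n != 0) && (Int.land n (n - 1) == 0)

-- A's while loop; the Nat fuel is only a totality guard (one unit per loop iteration;
-- the loop runs at most 2*len+2 times, so the fuel at the call site is never exhausted).
-- data.getD digit 0 is exact for Python's data[digit]: the guard ensures 0 ≤ digit < len.
def addPlacesLoop (data : List Int) : Nat → Int → Nat → List Int → List Int
  | 0, _, _, acc => acc
  | f + 1, i, digit, acc =>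
    if digit < data.length then
      if is_power_of_two i then
        addPlacesLoop data f (i + 1) digit (acc ++ [-1])
      else
        addPlacesLoop data f (i + 1) (digit + 1) (acc ++ [data.getD digit 0])
    else acc

def add_places (data : List Int) : List Int :=
  addPlacesLoop data (2 * data.length + 4) 1 0 []

-- ===== PORT B =====
-- B's while loop over blocks: per iteration append a placeholder and block-copy the slice
-- data[idx : idx + (1<<k) - 1].  Fuel (len+2) is only a totality guard, never exhausted.
def altLoop (data : List Int) : Nat → Nat → Nat → List Int → List Int
  | 0, _, _, acc => acc
  | f + 1, idx, k, acc =>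
    if idx < data.length then
      altLoop data f (idx + ((1 <<< k) - 1)) (k + 1)
        (acc ++ [-1] ++ PySem.List.slice data (some (idx : Int))
          (some ((idx : Int) + (((1 <<< k) - 1 : Nat) : Int))))
    else acc

def add_places_alt (data : List Int) : List Int :=
  altLoop data (data.length + 2) 0 0 []

-- ===== PRECONDITION & SPEC =====
def Spec_add_places (data : List Int) (out : List Int) : Prop := out = add_places_alt data
instance (data : List Int) (out : List Int) : Decidable (Spec_add_places data out) := by unfold Spec_add_places; infer_instance

-- ===== CLAIM (what is proved, stated in full; the proofs are below) =====
def Claim_equal_add_places : Prop := ∀ (data : List Int), Dom_add_places data → Spec_add_places data (add_places data)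

-- ===== LEMMAS AND PROOFS =====

-- is_power_of_two on a positive natural, reduced to the Nat bitwise test.
theorem is_power_of_two_natCast (m : Nat) (h : 1 ≤ m) :
    is_power_of_two (m : Int) = (m &&& (m - 1) == 0) := by
  have h1 : (m : Int) - 1 = ((m - 1 : Nat) : Int) := by omega
  have h2 : Int.land (m : Int) ((m - 1 : Nat) : Int) = ((m &&& (m - 1) : Nat) : Int) := rfl
  rw [is_power_of_two, h1, h2]
  have hne : ((m : Int) != 0) = true := by
    simp only [bne_iff_ne, ne_eq, Nat.cast_eq_zero]; omega
  rw [hne, Bool.true_and]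
  simp

theorem pow_is_pow (k : Nat) : is_power_of_two ((2 ^ k : Nat) : Int) = true := by
  rw [is_power_of_two_natCast _ Nat.one_le_two_pow]
  simp [Nat.and_two_pow_sub_one_eq_mod]

theorem between_not_pow (k p : Nat) (h1 : 2 ^ k < p) (h2 : p < 2 ^ (k + 1)) :
    is_power_of_two (p : Int) = false := by
  rw [is_power_of_two_natCast _ (by omega)]
  simp only [beq_eq_false_iff_ne, ne_eq]
  intro hz
  have ht : (p &&& (p - 1)).testBit k = true := by
    rw [Nat.testBit_and,
      Nat.testBit_of_two_pow_le_and_two_pow_add_one_gt (Nat.le_of_lt h1) h2,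
      Nat.testBit_of_two_pow_le_and_two_pow_add_one_gt (n := p - 1) (by omega) (by omega)]
    rfl
  rw [hz] at ht
  simp at ht

theorem A_at_end (data : List Int) (F : Nat) (i : Int) (acc : List Int) :
    addPlacesLoop data F i data.length acc = acc := by
  cases F <;> simp [addPlacesLoop]

theorem B_at_end (data : List Int) (f idx k : Nat) (acc : List Int)
    (h : data.length ≤ idx) : altLoop data f idx k acc = acc := by
  cases f <;> simp [altLoop, Nat.not_lt.mpr h]

-- A's copy run until the data is exhausted (no power-of-two position in between).
theorem copyAll (data : List Int) : ∀ (f i digit : Nat) (acc : List Int),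
    digit ≤ data.length → data.length - digit ≤ f →
    (∀ t : Nat, t < data.length - digit → is_power_of_two ((i + t : Nat) : Int) = false) →
    addPlacesLoop data f (i : Int) digit acc = acc ++ data.drop digit := by
  intro f
  induction f with
  | zero =>
    intro i digit acc h1 h2 _
    have : digit = data.length := by omega
    simp [addPlacesLoop, this]
  | succ f ih =>
    intro i digit acc h1 h2 hp
    by_cases hd : digit < data.length
    · have hp0 : is_power_of_two ((i : Nat) : Int) = false := by
        have := hp 0 (by omega); simpa using this
      have hstep : ((i : Nat) : Int) + 1 = ((i + 1 : Nat) : Int) := by push_cast; ring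
      rw [addPlacesLoop, if_pos hd, if_neg (by simp [hp0]), hstep,
        ih (i + 1) (digit + 1) _ (by omega) (by omega)
          (fun t ht => by
            have := hp (t + 1) (by omega)
            simpa [Nat.add_assoc, Nat.add_comm 1 t] using this)]
      rw [List.getD_eq_getElem data 0 hd,
        List.drop_eq_getElem_cons hd]
      simp
    · have : digit = data.length := by omega
      simp [addPlacesLoop, this]

-- A's copy run of exactly c elements (no power-of-two position in between).
theorem copyRun (data : List Int) : ∀ (c f i digit : Nat) (acc : List Int),
    digit + c ≤ data.length →
    (∀ t : Nat, t < c → is_power_of_two ((i + t : Nat) : Int) = false) →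
    addPlacesLoop data (c + f) (i : Int) digit acc =
      addPlacesLoop data f ((i + c : Nat) : Int) (digit + c) (acc ++ (data.drop digit).take c) := by
  intro c
  induction c with
  | zero => intro f i digit acc _ _; simp
  | succ c ih =>
    intro f i digit acc h1 hp
    have hd : digit < data.length := by omega
    have hp0 : is_power_of_two ((i : Nat) : Int) = false := by
      have := hp 0 (by omega); simpa using this
    have hstep : ((i : Nat) : Int) + 1 = ((i + 1 : Nat) : Int) := by push_cast; ring
    have : c + 1 + f = c + (f + 1) := by omega
    rw [show c + 1 + f = (c + f) + 1 by omega, addPlacesLoop, if_pos hd,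
      if_neg (by simp [hp0]), hstep,
      ih f (i + 1) (digit + 1) _ (by omega)
        (fun t ht => by
          have := hp (t + 1) (by omega)
          simpa [Nat.add_assoc, Nat.add_comm 1 t] using this)]
    rw [List.getD_eq_getElem data 0 hd]
    have hcast : i + 1 + c = i + (c + 1) := by omega
    have hdig : digit + 1 + c = digit + (c + 1) := by omega
    have hacc : acc ++ [data[digit]] ++ (data.drop (digit + 1)).take c
        = acc ++ (data.drop digit).take (c + 1) := by
      rw [List.drop_eq_getElem_cons hd, List.take_succ_cons, List.append_assoc]
      rfl
    rw [hcast, hdig, hacc]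

-- The block correspondence: A at position 2^k with cursor idx equals B at (idx, k).
theorem mainLoop (data : List Int) : ∀ (f k idx : Nat) (acc : List Int) (FA : Nat),
    idx ≤ data.length →
    data.length - idx + f ≤ FA →
    data.length - idx + 1 + (if k = 0 then 1 else 0) ≤ f →
    addPlacesLoop data FA ((2 ^ k : Nat) : Int) idx acc = altLoop data f idx k acc := by
  intro f
  induction f with
  | zero => intro k idx acc FA h1 h2 h3; omega
  | succ f ih =>
    intro k idx acc FA h1 h2 h3
    have h2k : 1 ≤ 2 ^ k := Nat.one_le_two_pow
    by_cases hd : idx < data.length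
    · -- A emits the placeholder at position 2^k
      obtain ⟨FA', rfl⟩ : ∃ FA', FA = FA' + 1 := ⟨FA - 1, by omega⟩
      have hstep : ((2 ^ k : Nat) : Int) + 1 = ((2 ^ k + 1 : Nat) : Int) := by push_cast; ring
      rw [addPlacesLoop, if_pos hd, if_pos (pow_is_pow k), hstep]
      -- B's step
      have hshift : (1 <<< k) - 1 = 2 ^ k - 1 := by rw [Nat.one_shiftLeft]
      have hslice : PySem.List.slice data (some (idx : Int))
          (some ((idx : Int) + (((1 <<< k) - 1 : Nat) : Int)))
          = (data.drop idx).take (2 ^ k - 1) := by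
        rw [PySem.List.slice_natCast_add, hshift]
      rw [altLoop, if_pos hd, hslice, hshift]
      set c := 2 ^ k - 1 with hc
      have hnonpow : ∀ t : Nat, t < c → is_power_of_two ((2 ^ k + 1 + t : Nat) : Int) = false := by
        intro t ht
        exact between_not_pow k _ (by omega) (by rw [Nat.pow_succ]; omega)
      have hc1 : k = 0 → c = 0 := by intro hk; simp [hc, hk]
      have hc2 : k ≠ 0 → 1 ≤ c := by
        intro hk
        have h22 : 2 ≤ 2 ^ k := by
          calc (2 : Nat) = 2 ^ 1 := rfl
          _ ≤ 2 ^ k := Nat.pow_le_pow_right (by omega) (by omega)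
        omega
      by_cases hcont : idx + c ≤ data.length
      · -- full block, continue
        obtain ⟨FA'', rfl⟩ : ∃ FA'', FA' = c + FA'' := ⟨FA' - c, by omega⟩
        have hpos : 2 ^ k + 1 + c = 2 ^ (k + 1) := by rw [Nat.pow_succ]; omega
        rw [copyRun data c FA'' (2 ^ k + 1) idx _ (by omega) hnonpow, hpos]
        refine ih (k + 1) (idx + c) _ FA'' (by omega) (by omega) ?_
        have h4 : (if k + 1 = 0 then 1 else 0) = 0 := by simp
        rw [h4]
        by_cases hk : k = 0
        · have := hc1 hk; simp [hk] at h3; omega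
        · have := hc2 hk; simp [hk] at h3; omega
      · -- truncated block: data runs out inside this block; both loops stop
        have hlen : data.length - idx ≤ c := by omega
        rw [copyAll data FA' (2 ^ k + 1) idx _ (by omega) (by omega)
          (fun t ht => hnonpow t (by omega))]
        rw [B_at_end data f _ (k + 1) _ (by omega)]
        have htake : (data.drop idx).take c = data.drop idx :=
          List.take_of_length_le (by simpa using hlen)
        rw [htake]
    · have : idx = data.length := by omega
      subst this
      rw [A_at_end]
      exact (B_at_end data (f + 1) data.length k acc (le_refl _)).symm

-- ===== VERDICT (by name: the statement is the Claim_ definition above) =====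
theorem add_places_spec : Claim_equal_add_places := by
  intro data _
  unfold Spec_add_places add_places add_places_alt
  have h1 : (1 : Int) = ((2 ^ 0 : Nat) : Int) := by norm_num
  rw [h1, mainLoop data (data.length + 2) 0 0 [] (2 * data.length + 4)
    (by omega) (by omega) (by simp)]
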